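-- pv_equiv track=rewrite | github.com/arizh0/securecallops | app/phonebanking/main.py | _candidate_name_layouts
-- ===== SOURCE A (Python) =====
-- def _partition_name(words, line_count: int):
--     if line_count == 1:
--         yield (" ".join(words),)
--         return
--
--     max_split = len(words) - line_count + 1
--     for split_at in range(1, max_split + 1):
--         head = " ".join(words[:split_at])
--         for tail in _partition_name(words[split_at:], line_count - 1):
--             yield (head, *tail)
--
-- def _candidate_name_layouts(name: str):
--     words = name.split()
--     if not words:
--         yield (name or "Unknown",)
--         return
--
--     max_lines = min(len(words), 3)
--     for line_count in range(1, max_lines + 1):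
--         yield from _partition_name(words, line_count)
-- ===== SOURCE B (Python) =====
-- def _candidate_name_layouts(name: str):
--     words = name.split()
--     if not words:
--         yield (name or "Unknown",)
--         return
--     n = len(words)
--     yield (" ".join(words),)
--     for i in range(1, n):
--         yield (" ".join(words[:i]), " ".join(words[i:]))
--     for i in range(1, n - 1):
--         for j in range(i + 1, n):
--             yield (" ".join(words[:i]), " ".join(words[i:j]), " ".join(words[j:]))
-- ===== Notes on version B (the rewrite author's own statement) =====
-- stated objective: simpler
-- what changed: Replaced the recursive generator _partition_name with a direct iterative enumeration that unrolls the fixed cap of 3 lines: one-line join, then a single loop over two-line split points, then a nested double loop over three-line split points, in the same order.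
import Mathlib
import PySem

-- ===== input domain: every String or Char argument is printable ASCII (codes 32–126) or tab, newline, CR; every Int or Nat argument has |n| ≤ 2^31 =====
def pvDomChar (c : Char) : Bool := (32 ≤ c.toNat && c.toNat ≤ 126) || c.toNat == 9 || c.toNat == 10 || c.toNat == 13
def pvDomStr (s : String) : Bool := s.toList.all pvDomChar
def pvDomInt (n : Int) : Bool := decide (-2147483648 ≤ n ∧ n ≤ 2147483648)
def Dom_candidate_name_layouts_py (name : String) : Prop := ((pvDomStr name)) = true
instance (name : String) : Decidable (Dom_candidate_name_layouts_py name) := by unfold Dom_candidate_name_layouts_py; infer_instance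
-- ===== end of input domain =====

-- B replaces the recursive generator with explicit loops unrolled over the fixed cap of 3 lines (same order, same values); no side effects involved.

-- ===== PORT A =====
-- _partition_name(words, line_count): recursion on line_count.
-- range(1, max_split + 1) with max_split = len(words) - line_count + 1 is List.range' 1 maxSplit
-- where maxSplit = words.length + 1 - line_count (Nat subtraction clamps at 0 exactly where the
-- Python range is empty, i.e. max_split ≤ 0). words[:s] / words[s:] with 0 ≤ s are take/drop
-- (PySem.List.slice_to_natCast / slice_from_natCast). The line_count = 0 arm is unreachable from
-- the entry point (Python would recurse without bound there).
def partition_name_py : List String → Nat → List (List String)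
  | _, 0 => []
  | words, 1 => [[PySem.Str.join " " words]]
  | words, lc + 2 =>
      let maxSplit := words.length + 1 - (lc + 2)
      (List.range' 1 maxSplit).foldl
        (fun acc splitAt =>
          acc ++ (partition_name_py (words.drop splitAt) (lc + 1)).map
            (fun tail => PySem.Str.join " " (words.take splitAt) :: tail)) []

def candidate_name_layouts_py (name : String) : List (List String) :=
  let words := PySem.Str.split₀ name
  if words = [] then
    [[if name = "" then "Unknown" else name]]   -- (name or "Unknown",)
  else
    let maxLines := min words.length 3
    -- range(1, max_lines + 1) = List.range' 1 maxLines (maxLines ≥ 1 here)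
    (List.range' 1 maxLines).foldl (fun acc lc => acc ++ partition_name_py words lc) []

-- ===== PORT B =====
-- Source B: yield the single-line join; then i in range(1, n) for the two-line splits;
-- then i in range(1, n-1), j in range(i+1, n) for the three-line splits.
-- range(a, b) over Nats is List.range' a (b - a); words[i:j] = (words.drop i).take (j - i).
def candidate_name_layouts_py_alt (name : String) : List (List String) :=
  let words := PySem.Str.split₀ name
  if words = [] then
    [[if name = "" then "Unknown" else name]]
  else
    let n := words.length
    [[PySem.Str.join " " words]]
    ++ (List.range' 1 (n - 1)).map
        (fun i => [PySem.Str.join " " (words.take i), PySem.Str.join " " (words.drop i)])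
    ++ (List.range' 1 (n - 2)).flatMap
        (fun i => (List.range' (i + 1) (n - 1 - i)).map
          (fun j => [PySem.Str.join " " (words.take i),
                     PySem.Str.join " " ((words.drop i).take (j - i)),
                     PySem.Str.join " " (words.drop j)]))

-- ===== PRECONDITION & SPEC =====
def Spec_candidate_name_layouts_py (name : String) (out : List (List String)) : Prop := out = candidate_name_layouts_py_alt name
instance (name : String) (out : List (List String)) : Decidable (Spec_candidate_name_layouts_py name out) := by unfold Spec_candidate_name_layouts_py; infer_instance

-- ===== CLAIM (what is proved, stated in full; the proofs are below) =====
def Claim_equal_candidate_name_layouts_py : Prop := ∀ (name : String), Dom_candidate_name_layouts_py name → Spec_candidate_name_layouts_py name (candidate_name_layouts_py name)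

-- ===== LEMMAS AND PROOFS =====

-- line_count = 2: the recursion enumerates the split points 1 .. n-1 in order.
theorem partition_name_py_two (ws : List String) :
    partition_name_py ws 2 =
      (List.range' 1 (ws.length - 1)).map
        (fun i => [PySem.Str.join " " (ws.take i), PySem.Str.join " " (ws.drop i)]) := by
  show (List.range' 1 (ws.length + 1 - 2)).foldl
      (fun acc splitAt =>
        acc ++ (partition_name_py (ws.drop splitAt) 1).map
          (fun tail => PySem.Str.join " " (ws.take splitAt) :: tail)) [] = _
  rw [show ws.length + 1 - 2 = ws.length - 1 from by omega]
  simp only [partition_name_py, List.map_cons, List.map_nil]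
  rw [PySem.List.foldl_append_singleton_eq_map]
  simp

theorem partition_name_py_three (ws : List String) :
    partition_name_py ws 3 =
      (List.range' 1 (ws.length - 2)).flatMap
        (fun i => (List.range' (i + 1) (ws.length - 1 - i)).map
          (fun j => [PySem.Str.join " " (ws.take i),
                     PySem.Str.join " " ((ws.drop i).take (j - i)),
                     PySem.Str.join " " (ws.drop j)])) := by
  show (List.range' 1 (ws.length + 1 - 3)).foldl
      (fun acc splitAt =>
        acc ++ (partition_name_py (ws.drop splitAt) 2).map
          (fun tail => PySem.Str.join " " (ws.take splitAt) :: tail)) [] = _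
  rw [PySem.List.foldl_append_eq_flatMap]
  rw [show ws.length + 1 - 3 = ws.length - 2 from by omega]
  simp only [List.nil_append]
  apply List.flatMap_congr
  intro i hi
  rw [List.mem_range'] at hi
  rw [partition_name_py_two, List.map_map]
  have hlen : (ws.drop i).length - 1 = ws.length - 1 - i := by
    simp only [List.length_drop]; omega
  rw [hlen, List.range'_eq_map_range, List.range'_eq_map_range, List.map_map, List.map_map]
  apply List.map_congr_left
  intro k hk
  simp only [Function.comp]
  have e1 : i + 1 + k - i = 1 + k := by omega
  have e2 : ws.drop (i + 1 + k) = (ws.drop i).drop (1 + k) := by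
    rw [List.drop_drop]; congr 1; omega
  rw [e1, e2]

-- ===== VERDICT (by name: the statement is the Claim_ definition above) =====
theorem candidate_name_layouts_py_spec : Claim_equal_candidate_name_layouts_py := by
  intro name _
  unfold Spec_candidate_name_layouts_py candidate_name_layouts_py candidate_name_layouts_py_alt
  set words := PySem.Str.split₀ name with hw
  by_cases h : words = []
  · simp [h]
  · simp only [h, ite_false]
    have hn : 0 < words.length := List.length_pos_iff.mpr h
    rcases Nat.lt_or_ge words.length 2 with h2 | h2
    · -- n = 1
      have : words.length = 1 := by omega
      simp [this, partition_name_py]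
    · rcases Nat.lt_or_ge words.length 3 with h3 | h3
      · -- n = 2
        have hmin : min words.length 3 = 2 := by omega
        have hr : List.range' 1 2 = [1, 2] := by decide
        rw [hmin, hr]
        simp only [List.foldl, List.nil_append]
        rw [partition_name_py_two]
        have : words.length - 2 = 0 := by omega
        simp [partition_name_py, this]
      · -- n ≥ 3
        have hmin : min words.length 3 = 3 := by omega
        have hr : List.range' 1 3 = [1, 2, 3] := by decide
        rw [hmin, hr]
        simp only [List.foldl, List.nil_append]
        rw [partition_name_py_two, partition_name_py_three]
        simp [partition_name_py]
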